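-- pv_equiv track=rewrite | github.com/valerpenko/jakob | santaclaus.py | get13s
-- ===== SOURCE A (Python) =====
-- def get13s(startYear, stopYear):             #число 13
--     months = [31, 28, 31, 30, 31, 30, 31, 31, 30, 31, 30]  # длинна месецов
--     res = [13]
--     for y in range(startYear, stopYear + 1):
--         for m in range(0, 11):
--             res.append(res[len(res) - 1] + months[m])
--             if m == 1 and y % 4 == 0:
--                 res[len(res) - 1] += 1
--     return res
-- ===== SOURCE B (Python) =====
-- def get13s(startYear, stopYear):
--     months = [31, 28, 31, 30, 31, 30, 31, 31, 30, 31, 30]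
--     # precomputed within-year cumulative offset tables
--     off = []
--     s = 0
--     for m in months:
--         s += m
--         off.append(s)
--     off_leap = off[:1] + [v + 1 for v in off[1:]]
--     res = [13]
--     base = 13
--     for y in range(startYear, stopYear + 1):
--         table = off_leap if y % 4 == 0 else off
--         res.extend(base + v for v in table)
--         base += table[-1]
--     return res
-- ===== Notes on version B (the rewrite author's own statement) =====
-- stated objective: alternative
-- what changed: A appends each day-count by reading the last element back out of the growing result and patching it in place for leap Februaries; B precomputes two fixed within-year cumulative-offset tables (leap and non-leap) once and then emits base+offset per year from an indexed pass, carrying only a per-year base.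
import Mathlib
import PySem

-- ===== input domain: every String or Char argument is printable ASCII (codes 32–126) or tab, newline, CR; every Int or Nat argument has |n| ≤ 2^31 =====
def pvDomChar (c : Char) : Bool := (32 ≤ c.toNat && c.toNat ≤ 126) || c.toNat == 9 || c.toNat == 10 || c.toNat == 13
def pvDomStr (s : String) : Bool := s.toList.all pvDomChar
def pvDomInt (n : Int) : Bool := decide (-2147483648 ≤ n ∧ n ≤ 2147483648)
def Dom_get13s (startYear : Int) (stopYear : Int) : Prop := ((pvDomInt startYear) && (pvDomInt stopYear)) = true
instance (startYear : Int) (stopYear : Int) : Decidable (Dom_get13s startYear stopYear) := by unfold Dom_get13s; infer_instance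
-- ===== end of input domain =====

-- B replaces A's self-referential running scan (each entry read back from the growing result,
-- plus an in-place leap-day patch) by a precomputed within-year cumulative-offset table and an
-- indexed emission pass keeping a per-year base (objective: alternative decomposition).

-- ===== PORT A =====
def get13s (startYear : Int) (stopYear : Int) : List Int :=
  let months : List Int := [31, 28, 31, 30, 31, 30, 31, 31, 30, 31, 30]
  (PySem.List.pyRange startYear (stopYear + 1) 1).foldl
    (fun res y =>
      (PySem.List.pyRange 0 11 1).foldl
        (fun res m =>
          -- res.append(res[len(res) - 1] + months[m]); res is never empty (starts as [13])
          let res := res ++ [PySem.List.pyGetD res (PySem.List.len res - 1) 0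
                              + PySem.List.pyGetD months m 0]
          if m == 1 && PySem.Int.mod y 4 == 0 then
            -- res[len(res) - 1] += 1
            PySem.List.pySetD res (PySem.List.len res - 1)
              (PySem.List.pyGetD res (PySem.List.len res - 1) 0 + 1)
          else res)
        res)
    [13]

-- ===== PORT B =====
def get13s_alt (startYear : Int) (stopYear : Int) : List Int :=
  let months : List Int := [31, 28, 31, 30, 31, 30, 31, 31, 30, 31, 30]
  let off := (months.foldl (fun (p : List Int × Int) m => (p.1 ++ [p.2 + m], p.2 + m)) ([], 0)).1
  let offLeap := off.take 1 ++ (off.drop 1).map (fun v => v + 1)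
  let st := (PySem.List.pyRange startYear (stopYear + 1) 1).foldl
    (fun (st : List Int × Int) y =>
      let table := if PySem.Int.mod y 4 == 0 then offLeap else off
      (st.1 ++ table.map (fun v => st.2 + v),
       st.2 + PySem.List.pyGetD table (-1) 0))
    ([13], 13)
  st.1

-- ===== PRECONDITION & SPEC =====
def Spec_get13s (startYear : Int) (stopYear : Int) (out : List Int) : Prop := out = get13s_alt startYear stopYear
instance (startYear : Int) (stopYear : Int) (out : List Int) : Decidable (Spec_get13s startYear stopYear out) := by unfold Spec_get13s; infer_instance

-- ===== CLAIM (what is proved, stated in full; the proofs are below) =====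
def Claim_equal_get13s : Prop := ∀ (startYear : Int) (stopYear : Int), Dom_get13s startYear stopYear → Spec_get13s startYear stopYear (get13s startYear stopYear)

-- ===== LEMMAS AND PROOFS =====

-- the last element of a snoc list, read Python-style at index len-1
theorem lastD (xs : List Int) (x d : Int) :
    PySem.List.pyGetD (xs ++ [x]) (PySem.List.len (xs ++ [x]) - 1) d = x := by
  have h : PySem.List.len (xs ++ [x]) - 1 = (xs.length : Int) := by
    simp [PySem.List.len_eq]
  rw [h, PySem.List.pyGetD_natCast]
  simp

-- overwriting the last element of a snoc list, Python-style at index len-1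
theorem setLast (xs : List Int) (x v : Int) :
    PySem.List.pySetD (xs ++ [x]) (PySem.List.len (xs ++ [x]) - 1) v = xs ++ [v] := by
  have h : PySem.List.len (xs ++ [x]) - 1 = (xs.length : Int) := by
    simp [PySem.List.len_eq]
  rw [h, PySem.List.pySetD_natCast]
  simp [List.set_append_right]

def pvMonths : List Int := [31, 28, 31, 30, 31, 30, 31, 31, 30, 31, 30]

-- A's inner-loop body, named so the 11 iterations can be rewritten one by one
def stepM (y : Int) (res : List Int) (m : Int) : List Int :=
  let res := res ++ [PySem.List.pyGetD res (PySem.List.len res - 1) 0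
                      + PySem.List.pyGetD pvMonths m 0]
  if m == 1 && PySem.Int.mod y 4 == 0 then
    PySem.List.pySetD res (PySem.List.len res - 1)
      (PySem.List.pyGetD res (PySem.List.len res - 1) 0 + 1)
  else res

-- B's year-step with the two offset tables already evaluated
def stepB (st : List Int × Int) (y : Int) : List Int × Int :=
  let table : List Int := if PySem.Int.mod y 4 == 0
    then [31, 60, 91, 121, 152, 182, 213, 244, 274, 305, 335]
    else [31, 59, 90, 120, 151, 181, 212, 243, 273, 304, 334]
  (st.1 ++ table.map (fun v => st.2 + v), st.2 + PySem.List.pyGetD table (-1) 0)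

theorem stepM_ne (y m : Int) (xs : List Int) (x c : Int)
    (hm : (m == 1 && PySem.Int.mod y 4 == 0) = false)
    (hc : PySem.List.pyGetD pvMonths m 0 = c) :
    stepM y (xs ++ [x]) m = (xs ++ [x]) ++ [x + c] := by
  simp only [stepM, lastD, hc, hm, Bool.false_eq_true, if_false]

theorem stepM_leap (y : Int) (xs : List Int) (x : Int) (h : PySem.Int.mod y 4 = 0) :
    stepM y (xs ++ [x]) 1 = (xs ++ [x]) ++ [x + 29] := by
  have hc : PySem.List.pyGetD pvMonths 1 0 = 28 := by decide
  rw [stepM]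
  rw [lastD, hc, h]
  rw [show (((1:Int) == 1 && (0:Int) == 0)) = true from rfl, if_pos rfl]
  rw [lastD, setLast]
  rw [show x + 28 + 1 = x + 29 from by ring]

theorem yearA_leap (y : Int) (h : PySem.Int.mod y 4 = 0) (r : List Int) (b : Int) :
    (PySem.List.pyRange 0 11 1).foldl (stepM y) (r ++ [b]) =
      r ++ [b, b+31, b+60, b+91, b+121, b+152, b+182, b+213, b+244, b+274, b+305, b+335] := by
  have hr : PySem.List.pyRange 0 11 1 = [0,1,2,3,4,5,6,7,8,9,10] := by decide
  rw [hr]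
  simp only [List.foldl_cons, List.foldl_nil]
  rw [stepM_ne y 0 r b 31 (by simp) (by decide),
      stepM_leap y _ _ h,
      stepM_ne y 2 _ _ 31 (by simp) (by decide),
      stepM_ne y 3 _ _ 30 (by simp) (by decide),
      stepM_ne y 4 _ _ 31 (by simp) (by decide),
      stepM_ne y 5 _ _ 30 (by simp) (by decide),
      stepM_ne y 6 _ _ 31 (by simp) (by decide),
      stepM_ne y 7 _ _ 31 (by simp) (by decide),
      stepM_ne y 8 _ _ 30 (by simp) (by decide),
      stepM_ne y 9 _ _ 31 (by simp) (by decide),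
      stepM_ne y 10 _ _ 30 (by simp) (by decide)]
  simp only [List.append_assoc, List.cons_append, List.nil_append, List.cons.injEq, and_true, true_and, List.append_cancel_left_eq]
  omega

theorem yearA_nonleap (y : Int) (h : ¬ PySem.Int.mod y 4 = 0) (r : List Int) (b : Int) :
    (PySem.List.pyRange 0 11 1).foldl (stepM y) (r ++ [b]) =
      r ++ [b, b+31, b+59, b+90, b+120, b+151, b+181, b+212, b+243, b+273, b+304, b+334] := by
  have hr : PySem.List.pyRange 0 11 1 = [0,1,2,3,4,5,6,7,8,9,10] := by decide
  rw [hr]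
  simp only [List.foldl_cons, List.foldl_nil]
  rw [stepM_ne y 0 r b 31 (by simp) (by decide),
      stepM_ne y 1 _ _ 28 (by simpa [PySem.Int.mod_eq_zero_iff_dvd] using h) (by decide),
      stepM_ne y 2 _ _ 31 (by simp) (by decide),
      stepM_ne y 3 _ _ 30 (by simp) (by decide),
      stepM_ne y 4 _ _ 31 (by simp) (by decide),
      stepM_ne y 5 _ _ 30 (by simp) (by decide),
      stepM_ne y 6 _ _ 31 (by simp) (by decide),
      stepM_ne y 7 _ _ 31 (by simp) (by decide),
      stepM_ne y 8 _ _ 30 (by simp) (by decide),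
      stepM_ne y 9 _ _ 31 (by simp) (by decide),
      stepM_ne y 10 _ _ 30 (by simp) (by decide)]
  simp only [List.append_assoc, List.cons_append, List.nil_append, List.cons.injEq, and_true, true_and, List.append_cancel_left_eq]
  omega

theorem stepB_leap (y : Int) (h : PySem.Int.mod y 4 = 0) (l : List Int) (b : Int) :
    stepB (l, b) y = (l ++ [b+31, b+60, b+91, b+121, b+152, b+182, b+213, b+244, b+274, b+305, b+335], b + 335) := by
  simp only [stepB, h]
  norm_num
  decide

theorem stepB_nonleap (y : Int) (h : ¬ PySem.Int.mod y 4 = 0) (l : List Int) (b : Int) :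
    stepB (l, b) y = (l ++ [b+31, b+59, b+90, b+120, b+151, b+181, b+212, b+243, b+273, b+304, b+334], b + 334) := by
  rw [stepB, if_neg (by simpa [PySem.Int.mod_eq_zero_iff_dvd] using h : ¬ (PySem.Int.mod y 4 == 0) = true)]
  norm_num
  decide

-- loop invariant: A's fold over any list of years, started on a list ending in b,
-- agrees with B's table-indexed fold started on the same list with base b
theorem main_inv (ys : List Int) (r : List Int) (b : Int) :
    ys.foldl (fun res y => (PySem.List.pyRange 0 11 1).foldl (stepM y) res) (r ++ [b]) =
      (ys.foldl stepB (r ++ [b], b)).1 := by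
  induction ys generalizing r b with
  | nil => simp
  | cons y ys ih =>
    simp only [List.foldl_cons]
    by_cases h : PySem.Int.mod y 4 = 0
    · rw [yearA_leap y h r b, stepB_leap y h (r ++ [b]) b]
      have := ih (r ++ [b, b+31, b+60, b+91, b+121, b+152, b+182, b+213, b+244, b+274, b+305]) (b+335)
      simpa [List.append_assoc] using this
    · rw [yearA_nonleap y h r b, stepB_nonleap y h (r ++ [b]) b]
      have := ih (r ++ [b, b+31, b+59, b+90, b+120, b+151, b+181, b+212, b+243, b+273, b+304]) (b+334)
      simpa [List.append_assoc] using this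

theorem ports_eq (startYear stopYear : Int) :
    get13s startYear stopYear = get13s_alt startYear stopYear := by
  have hA : get13s startYear stopYear =
      (PySem.List.pyRange startYear (stopYear + 1) 1).foldl
        (fun res y => (PySem.List.pyRange 0 11 1).foldl (stepM y) res) (([] : List Int) ++ [13]) := rfl
  have hB : get13s_alt startYear stopYear =
      ((PySem.List.pyRange startYear (stopYear + 1) 1).foldl stepB (([] : List Int) ++ [13], 13)).1 := rfl
  rw [hA, hB, main_inv]

-- ===== VERDICT (by name: the statement is the Claim_ definition above) =====
theorem get13s_spec : Claim_equal_get13s := by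
  intro startYear stopYear _
  unfold Spec_get13s
  exact ports_eq startYear stopYear
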